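-- pv_equiv track=rewrite | github.com/autoppia/autoppia_iwa | autoppia_iwa/src/demo_webs/projects/cinema_1/replace_functions.py | filter_film_replace_func
-- ===== SOURCE A (Python) =====
-- def filter_film_replace_func(text: str) -> str:
--     """Replace placeholders for year, genre, and movie name with web_agent_id"""
--     if not isinstance(text, str):
--         return text
--
--     replacements = {
--         "<year>": "2001",
--         "<genre>": "Action",
--         "<movie_name>": "The Lord of the Rings: The Fellowship of the Ring",
--     }
--
--     for placeholder, value in replacements.items():
--         text = text.replace(placeholder, value)
--
--     return text
-- ===== SOURCE B (Python) =====
-- MOVIE = "The Lord of the Rings: The Fellowship of the Ring"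
--
--
-- def filter_film_replace_func(text: str) -> str:
--     """Replace placeholders for year, genre, and movie name with web_agent_id"""
--     if not isinstance(text, str):
--         return text
--
--     table = (("<year>", "2001"), ("<genre>", "Action"), ("<movie_name>", MOVIE))
--     out = []
--     i = 0
--     n = len(text)
--     while i < n:
--         for placeholder, value in table:
--             if text.startswith(placeholder, i):
--                 out.append(value)
--                 i += len(placeholder)
--                 break
--         else:
--             out.append(text[i])
--             i += 1
--     return "".join(out)
-- ===== Notes on version B (the rewrite author's own statement) =====
-- stated objective: alternative
-- what changed: Instead of three sequential full-string str.replace passes, B does a single left-to-right table-driven scan that matches all three placeholders in one pass and builds the output once.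
import Mathlib
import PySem

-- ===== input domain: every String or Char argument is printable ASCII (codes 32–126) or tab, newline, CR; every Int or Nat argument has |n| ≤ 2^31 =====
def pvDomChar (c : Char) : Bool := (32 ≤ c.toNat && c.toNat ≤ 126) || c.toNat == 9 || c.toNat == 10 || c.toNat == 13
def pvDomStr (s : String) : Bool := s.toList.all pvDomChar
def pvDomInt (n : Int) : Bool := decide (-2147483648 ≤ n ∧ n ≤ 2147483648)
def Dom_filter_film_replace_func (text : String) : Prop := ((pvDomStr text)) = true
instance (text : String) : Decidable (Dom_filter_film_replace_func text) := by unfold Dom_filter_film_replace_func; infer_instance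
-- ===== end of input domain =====

set_option maxRecDepth 8000


-- B replaces A's three sequential str.replace passes by one table-driven left-to-right scan; return values proved equal for all strings.

-- ===== PORT A =====
-- A applies three sequential whole-string replace passes, in dict order.
def filter_film_replace_func (text : String) : String :=
  let t1 := PySem.Str.replace text "<year>" "2001"
  let t2 := PySem.Str.replace t1 "<genre>" "Action"
  let t3 := PySem.Str.replace t2 "<movie_name>" "The Lord of the Rings: The Fellowship of the Ring"
  t3

-- ===== PORT B =====
-- B's while-loop over positions, as the obvious structural recursion: at each
-- position try the three placeholders in table order, else copy one character.
def pvScanB (cs : List Char) : List Char :=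
  match cs with
  | [] => []
  | c :: t =>
    if "<year>".toList.isPrefixOf (c :: t) then
      "2001".toList ++ pvScanB (t.drop 5)
    else if "<genre>".toList.isPrefixOf (c :: t) then
      "Action".toList ++ pvScanB (t.drop 6)
    else if "<movie_name>".toList.isPrefixOf (c :: t) then
      "The Lord of the Rings: The Fellowship of the Ring".toList ++ pvScanB (t.drop 11)
    else
      c :: pvScanB t
termination_by cs.length
decreasing_by all_goals simp

def filter_film_replace_func_alt (text : String) : String :=
  String.ofList (pvScanB text.toList)

-- ===== PRECONDITION & SPEC =====
def Spec_filter_film_replace_func (text : String) (out : String) : Prop := out = filter_film_replace_func_alt text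
instance (text : String) (out : String) : Decidable (Spec_filter_film_replace_func text out) := by unfold Spec_filter_film_replace_func; infer_instance

-- ===== CLAIM (what is proved, stated in full; the proofs are below) =====
def Claim_equal_filter_film_replace_func : Prop := ∀ (text : String), Dom_filter_film_replace_func text → Spec_filter_film_replace_func text (filter_film_replace_func text)

-- ===== LEMMAS AND PROOFS =====

-- A clean structural recursion computing Python's s.replace(old, new) for old ≠ "".
def myRep (old new : List Char) : List Char → List Char
  | [] => []
  | c :: t =>
    if old.isPrefixOf (c :: t) then new ++ myRep old new (t.drop (old.length - 1))
    else c :: myRep old new t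
termination_by l => l.length
decreasing_by all_goals simp

theorem go_eq (o0 : Char) (o' new : List Char) :
    ∀ fuel l acc, l.length ≤ fuel →
      PySem.Chars.replace.go (o0 :: o') new fuel l acc = acc.reverse ++ myRep (o0 :: o') new l := by
  intro fuel
  induction fuel with
  | zero =>
    intro l acc h
    have : l = [] := List.length_eq_zero_iff.mp (Nat.le_zero.mp h)
    subst this
    simp [PySem.Chars.replace.go, myRep]
  | succ n ih =>
    intro l acc h
    match l with
    | [] => simp [PySem.Chars.replace.go, myRep]
    | c :: t =>
      by_cases hp : (o0 :: o').isPrefixOf (c :: t)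
      · rw [PySem.Chars.replace.go]
        simp only [hp, if_true]
        have hlen : (List.drop (o0 :: o').length (c :: t)).length ≤ n := by
          simp at h ⊢; omega
        rw [ih _ _ hlen]
        have hdrop : List.drop (o0 :: o').length (c :: t) = t.drop ((o0 :: o').length - 1) := by
          simp
        rw [myRep, if_pos hp, hdrop]
        simp
      · rw [PySem.Chars.replace.go]
        simp only [hp]
        have hlen : t.length ≤ n := by simp at h; omega
        rw [ih _ _ hlen]
        rw [myRep, if_neg hp]
        simp

theorem replace_eq (o0 : Char) (o' new s : List Char) :
    PySem.Chars.replace s (o0 :: o') new = myRep (o0 :: o') new s := by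
  rw [PySem.Chars.replace]
  simp only [List.isEmpty_cons, Bool.false_eq_true, if_false]
  rw [go_eq o0 o' new s.length s [] (le_refl _)]
  simp

-- pass-through: a pattern starting with '<' leaves a '<'-free prefix untouched
theorem passthrough (o' new : List Char) :
    ∀ xs u, '<' ∉ xs →
      myRep ('<' :: o') new (xs ++ u) = xs ++ myRep ('<' :: o') new u := by
  intro xs
  induction xs with
  | nil => intro u _; simp
  | cons x xs' ih =>
    intro u hx
    have hxne : x ≠ '<' := fun hh => hx (by simp [hh])
    have hnp : ¬ ('<' :: o').isPrefixOf (x :: (xs' ++ u)) := by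
      simp [List.isPrefixOf_iff_prefix, List.cons_prefix_cons]
      intro h; exact absurd h.symm hxne
    rw [List.cons_append, myRep, if_neg hnp, ih u (fun hh => hx (List.mem_cons_of_mem _ hh))]
    simp

-- no-create: replacing cannot create a fresh occurrence of a pattern q that
-- avoids the replacement value's first character
theorem nocreate (old : List Char) (v0 : Char) (vrest : List Char) :
    ∀ u q, q ≠ [] → v0 ∉ q → ¬ q <+: u → ¬ q <+: myRep old (v0 :: vrest) u := by
  intro u
  induction u with
  | nil =>
    intro q hq _ _ hcon
    rw [myRep] at hcon
    exact hq (List.prefix_nil.mp hcon)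
  | cons c t ih =>
    intro q hq hv0 hqu
    by_cases hp : old.isPrefixOf (c :: t)
    · rw [myRep, if_pos hp]
      intro hcon
      match q, hq with
      | q0 :: q', _ =>
        rw [List.cons_append, List.cons_prefix_cons] at hcon
        exact hv0 (by simp [← hcon.1])
    · rw [myRep, if_neg hp]
      intro hcon
      match q, hq with
      | q0 :: q', _ =>
        rw [List.cons_prefix_cons] at hcon
        obtain ⟨hq0, hq'⟩ := hcon
        subst hq0
        match q' with
        | [] => exact hqu (by simp)
        | d :: q'' =>
          have hqu' : ¬ (d :: q'') <+: t := by
            intro h; exact hqu (List.cons_prefix_cons.mpr ⟨rfl, h⟩)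
          exact ih (d :: q'') (by simp) (fun h => hv0 (by simp [h])) hqu' hq'

-- the combined three-pass replacement
def repA (cs : List Char) : List Char :=
  myRep "<movie_name>".toList "The Lord of the Rings: The Fellowship of the Ring".toList
    (myRep "<genre>".toList "Action".toList
      (myRep "<year>".toList "2001".toList cs))

-- one matching step of myRep
theorem rep_match (p' v u : List Char) :
    myRep ('<' :: p') v ('<' :: (p' ++ u)) = v ++ myRep ('<' :: p') v u := by
  rw [myRep,
    if_pos (List.isPrefixOf_iff_prefix.mpr (by rw [← List.cons_append]; exact List.prefix_append _ _))]
  have : ('<' :: p').length - 1 = p'.length := by simp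
  rw [this, List.drop_left]

-- one non-matching step of myRep
theorem rep_step (p' v : List Char) (c : Char) (t : List Char) (h : ¬ ('<' :: p') <+: c :: t) :
    myRep ('<' :: p') v (c :: t) = c :: myRep ('<' :: p') v t := by
  rw [myRep, if_neg (fun hc => h (List.isPrefixOf_iff_prefix.mp hc))]

theorem drop_lit (xs u : List Char) (k : Nat) (h : xs.length = k) : (xs ++ u).drop k = u := by
  subst h; exact List.drop_left

theorem not_prefix_append (q xs z : List Char) (hle : q.length ≤ xs.length) (h : ¬ q <+: xs) :
    ¬ q <+: xs ++ z := by
  intro hc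
  apply h
  rw [List.prefix_iff_eq_take] at hc ⊢
  rwa [List.take_append_of_le_length hle] at hc

theorem main_eq : ∀ n cs, cs.length ≤ n → repA cs = pvScanB cs := by
  intro n
  induction n with
  | zero =>
    intro cs h
    have : cs = [] := List.length_eq_zero_iff.mp (Nat.le_zero.mp h)
    subst this
    simp [repA, myRep, pvScanB]
  | succ n ih =>
    intro cs h
    have decY : "<year>".toList = '<' :: "year>".toList := by decide
    have decG : "<genre>".toList = '<' :: "genre>".toList := by decide
    have decM : "<movie_name>".toList = '<' :: "movie_name>".toList := by decide
    have decVY : "2001".toList = '2' :: "001".toList := by decide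
    have decVG : "Action".toList = 'A' :: "ction".toList := by decide
    by_cases h1 : "<year>".toList <+: cs
    · -- year matches
      rw [decY] at h1
      obtain ⟨u, rfl⟩ := h1
      have hu : u.length ≤ n := by
        have : ('<' :: "year>".toList).length = 6 := by decide
        rw [List.length_append, this] at h; omega
      unfold repA
      rw [decY, decG, decM, List.cons_append, rep_match,
        passthrough "genre>".toList "Action".toList "2001".toList _ (by decide),
        passthrough "movie_name>".toList "The Lord of the Rings: The Fellowship of the Ring".toList "2001".toList _ (by decide)]
      rw [pvScanB]
      rw [if_pos (by rw [decY, List.isPrefixOf_iff_prefix, List.cons_prefix_cons]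
                     exact ⟨rfl, List.prefix_append _ _⟩)]
      rw [drop_lit _ _ 5 (by decide)]
      rw [← decY, ← decG, ← decM]
      exact congrArg _ (ih u hu)
    · by_cases h2 : "<genre>".toList <+: cs
      · -- genre matches
        rw [decG] at h2
        obtain ⟨u, rfl⟩ := h2
        have hu : u.length ≤ n := by
          have : ('<' :: "genre>".toList).length = 7 := by decide
          rw [List.length_append, this] at h; omega
        unfold repA
        rw [decY, decG, decM]
        rw [List.cons_append, rep_step _ _ _ _ (by rw [← decY]; exact h1),
          passthrough "year>".toList "2001".toList "genre>".toList _ (by decide), rep_match,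
          passthrough "movie_name>".toList "The Lord of the Rings: The Fellowship of the Ring".toList "Action".toList _ (by decide)]
        rw [pvScanB]
        rw [if_neg (fun hc => h1 (by rw [decY]; exact List.isPrefixOf_iff_prefix.mp hc))]
        rw [if_pos (by rw [decG, List.isPrefixOf_iff_prefix, List.cons_prefix_cons]; exact ⟨rfl, List.prefix_append _ _⟩)]
        rw [drop_lit _ _ 6 (by decide)]
        rw [← decY, ← decG, ← decM]
        exact congrArg _ (ih u hu)
      · by_cases h3 : "<movie_name>".toList <+: cs
        · -- movie_name matches
          rw [decM] at h3
          obtain ⟨u, rfl⟩ := h3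
          have hu : u.length ≤ n := by
            have : ('<' :: "movie_name>".toList).length = 12 := by decide
            rw [List.length_append, this] at h; omega
          unfold repA
          rw [decY, decG, decM]
          rw [List.cons_append, rep_step _ _ _ _ (by rw [← decY]; exact h1),
            passthrough "year>".toList "2001".toList "movie_name>".toList _ (by decide)]
          have hGnp : ¬ ('<' :: "genre>".toList) <+: '<' :: ("movie_name>".toList ++ myRep ('<' :: "year>".toList) "2001".toList u) := by
            rw [List.cons_prefix_cons]
            rintro ⟨-, hc⟩
            exact not_prefix_append _ _ _ (by decide) (by decide) hc
          rw [rep_step _ _ _ _ hGnp,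
            passthrough "genre>".toList "Action".toList "movie_name>".toList _ (by decide), rep_match]
          rw [pvScanB]
          rw [if_neg (fun hc => h1 (by rw [decY]; exact List.isPrefixOf_iff_prefix.mp hc))]
          rw [if_neg (fun hc => h2 (by rw [decG]; exact List.isPrefixOf_iff_prefix.mp hc))]
          rw [if_pos (by rw [decM, List.isPrefixOf_iff_prefix, List.cons_prefix_cons]; exact ⟨rfl, List.prefix_append _ _⟩)]
          rw [drop_lit _ _ 11 (by decide)]
          rw [← decY, ← decG, ← decM]
          exact congrArg _ (ih u hu)
        · -- no placeholder at this position
          match cs with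
          | [] => simp [repA, myRep, pvScanB]
          | c :: t =>
            have ht : t.length ≤ n := by simp at h; omega
            rw [decY] at h1; rw [decG] at h2; rw [decM] at h3
            unfold repA
            rw [decY, decG, decM]
            rw [rep_step _ _ _ _ h1]
            have hG' : ¬ ('<' :: "genre>".toList) <+: c :: myRep ('<' :: "year>".toList) "2001".toList t := by
              intro hc
              obtain ⟨hc1, hc2⟩ := List.cons_prefix_cons.mp hc
              subst hc1
              have hqt : ¬ "genre>".toList <+: t := fun hq => h2 (List.cons_prefix_cons.mpr ⟨rfl, hq⟩)
              rw [decVY] at hc2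
              exact nocreate _ '2' _ t _ (by decide) (by decide) hqt hc2
            rw [rep_step _ _ _ _ hG']
            have hM' : ¬ ('<' :: "movie_name>".toList) <+:
                c :: myRep ('<' :: "genre>".toList) "Action".toList (myRep ('<' :: "year>".toList) "2001".toList t) := by
              intro hc
              obtain ⟨hc1, hc2⟩ := List.cons_prefix_cons.mp hc
              subst hc1
              have hqt : ¬ "movie_name>".toList <+: t := fun hq => h3 (List.cons_prefix_cons.mpr ⟨rfl, hq⟩)
              have hq1 : ¬ "movie_name>".toList <+: myRep ('<' :: "year>".toList) "2001".toList t := by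
                rw [decVY]; exact nocreate _ '2' _ t _ (by decide) (by decide) hqt
              rw [decVG] at hc2
              exact nocreate _ 'A' _ _ _ (by decide) (by decide) hq1 hc2
            rw [rep_step _ _ _ _ hM']
            rw [pvScanB]
            rw [if_neg (fun hc => h1 (by rw [← decY]; exact List.isPrefixOf_iff_prefix.mp hc))]
            rw [if_neg (fun hc => h2 (by rw [← decG]; exact List.isPrefixOf_iff_prefix.mp hc))]
            rw [if_neg (fun hc => h3 (by rw [← decM]; exact List.isPrefixOf_iff_prefix.mp hc))]
            rw [← decY, ← decG, ← decM]
            exact congrArg _ (ih t ht)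

theorem str_version (text : String) : filter_film_replace_func text = filter_film_replace_func_alt text := by
  unfold filter_film_replace_func filter_film_replace_func_alt
  simp only [PySem.Str.replace, String.toList_ofList]
  have decY : "<year>".toList = '<' :: "year>".toList := by decide
  have decG : "<genre>".toList = '<' :: "genre>".toList := by decide
  have decM : "<movie_name>".toList = '<' :: "movie_name>".toList := by decide
  rw [decY, decG, decM, replace_eq, replace_eq, replace_eq, ← decY, ← decG, ← decM]
  exact congrArg String.ofList (main_eq text.toList.length text.toList (le_refl _))

-- ===== VERDICT (by name: the statement is the Claim_ definition above) =====
theorem filter_film_replace_func_spec : Claim_equal_filter_film_replace_func := by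
  intro text _
  unfold Spec_filter_film_replace_func
  exact str_version text
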